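-- pv_equiv track=rewrite | github.com/Ritvik19/CodeBook | data/AlgoExpert/Sweet And Savory.py | sweetAndSavory
-- ===== SOURCE A (Python) =====
-- def sweetAndSavory(dishes, target):
--     sweet_dishes = sorted([dish for dish in dishes if dish < 0], key=abs)
--     savory_dishes = sorted([dish for dish in dishes if dish > 0])
--
--     best_pair = [0, 0]
--     best_diff = float("inf")
--     sweet_idx, savory_idx = 0, 0
--
--     while sweet_idx < len(sweet_dishes) and savory_idx < len(savory_dishes):
--         current_sum = sweet_dishes[sweet_idx] + savory_dishes[savory_idx]
--
--         if current_sum <= target: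
--             current_diff = target - current_sum
--             if current_diff < best_diff:
--                 best_diff = current_diff
--                 best_pair = [sweet_dishes[sweet_idx], savory_dishes[savory_idx]]
--             savory_idx += 1
--         else:
--             sweet_idx += 1
--
--     return best_pair
-- ===== SOURCE B (Python) =====
-- def sweetAndSavory(dishes, target):
--     sweet_dishes = sorted([dish for dish in dishes if dish < 0], key=abs)
--     savory_dishes = sorted([dish for dish in dishes if dish > 0])
--
--     best_pair = [0, 0]
--     best_diff = None
--
--     for sweet in sweet_dishes:
--         for savory in savory_dishes:
--             current_sum = sweet + savory
--             if current_sum <= target and (best_diff is None or target - current_sum < best_diff):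
--                 best_diff = target - current_sum
--                 best_pair = [sweet, savory]
--
--     return best_pair
-- ===== Notes on version B (the rewrite author's own statement) =====
-- stated objective: simpler
-- what changed: The stateful two-pointer while-loop over both sorted lists is replaced by a plain brute-force double loop over all sweet/savory pairs (same two sorted lists, strict-< update keeps the first best pair).
import Mathlib
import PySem

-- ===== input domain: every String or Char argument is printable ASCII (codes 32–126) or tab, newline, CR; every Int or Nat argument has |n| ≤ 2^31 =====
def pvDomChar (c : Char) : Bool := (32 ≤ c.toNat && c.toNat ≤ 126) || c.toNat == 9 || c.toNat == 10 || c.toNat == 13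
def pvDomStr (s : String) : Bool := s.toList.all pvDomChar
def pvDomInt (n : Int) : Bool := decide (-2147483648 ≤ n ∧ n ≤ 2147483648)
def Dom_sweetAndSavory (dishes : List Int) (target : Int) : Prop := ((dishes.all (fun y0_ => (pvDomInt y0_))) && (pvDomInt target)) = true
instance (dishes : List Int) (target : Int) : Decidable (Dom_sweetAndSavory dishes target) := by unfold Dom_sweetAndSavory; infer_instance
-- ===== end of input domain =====

-- B replaces A's two-pointer sweep by a brute-force double loop over the same two sorted lists (simpler, not faster); return values proved equal.

-- ===== PORT A =====
-- best_diff = float("inf") is modelled as Option Int with none = inf (current_diff < inf is always true).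
def ssLoop (target : Int) : List Int → List Int → List Int → Option Int → List Int
  | s :: sweets', v :: savories', bestPair, bestDiff =>
      let currentSum := s + v
      if currentSum ≤ target then
        let currentDiff := target - currentSum
        if (match bestDiff with | none => true | some d => decide (currentDiff < d)) then
          ssLoop target (s :: sweets') savories' [s, v] (some currentDiff)
        else
          ssLoop target (s :: sweets') savories' bestPair bestDiff
      else
        ssLoop target sweets' (v :: savories') bestPair bestDiff
  | _, _, bestPair, _ => bestPair
termination_by ss vs _ _ => ss.length + vs.length

def sweetAndSavory (dishes : List Int) (target : Int) : List Int :=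
  let sweet_dishes := PySem.List.sorted (dishes.filter (fun dish => decide (dish < 0))) (fun dish => |dish|)
  let savory_dishes := PySem.List.sorted (dishes.filter (fun dish => decide (dish > 0))) (fun dish => dish)
  ssLoop target sweet_dishes savory_dishes [0, 0] none

-- ===== PORT B =====
-- best_diff = None until the first valid pair; the update condition is one combined test.
def ssStep (target sweet : Int) (acc : List Int × Option Int) (savory : Int) : List Int × Option Int :=
  let currentSum := sweet + savory
  if currentSum ≤ target ∧ (match acc.2 with | none => true | some d => decide (target - currentSum < d)) = true then
    ([sweet, savory], some (target - currentSum))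
  else acc

def sweetAndSavory_alt (dishes : List Int) (target : Int) : List Int :=
  let sweet_dishes := PySem.List.sorted (dishes.filter (fun dish => decide (dish < 0))) (fun dish => |dish|)
  let savory_dishes := PySem.List.sorted (dishes.filter (fun dish => decide (dish > 0))) (fun dish => dish)
  (sweet_dishes.foldl (fun acc sweet => savory_dishes.foldl (ssStep target sweet) acc) ([0, 0], none)).1

-- ===== PRECONDITION & SPEC =====
def Spec_sweetAndSavory (dishes : List Int) (target : Int) (out : List Int) : Prop := out = sweetAndSavory_alt dishes target
instance (dishes : List Int) (target : Int) (out : List Int) : Decidable (Spec_sweetAndSavory dishes target out) := by unfold Spec_sweetAndSavory; infer_instance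

-- ===== CLAIM (what is proved, stated in full; the proofs are below) =====
def Claim_equal_sweetAndSavory : Prop := ∀ (dishes : List Int) (target : Int), Dom_sweetAndSavory dishes target → Spec_sweetAndSavory dishes target (sweetAndSavory dishes target)

-- ===== LEMMAS AND PROOFS =====

-- "processing pair (s, v) cannot change an accumulator with best difference d":
-- either the pair is invalid or its difference is at least d.
def noopC (target : Int) (d : Option Int) (s v : Int) : Prop :=
  s + v ≤ target → ∃ dd, d = some dd ∧ dd ≤ target - (s + v)

lemma step_noop_of_noopC (target s v : Int) (acc : List Int × Option Int)
    (h : noopC target acc.2 s v) : ssStep target s acc v = acc := by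
  rcases acc with ⟨bp, d⟩
  simp only [ssStep]
  split_ifs with hc
  · obtain ⟨hle, hlt⟩ := hc
    obtain ⟨dd, hdd, hle2⟩ := h hle
    subst hdd
    simp only [decide_eq_true_eq] at hlt
    omega
  · rfl

lemma step_noop_of_gt (target s v : Int) (acc : List Int × Option Int)
    (h : target < s + v) : ssStep target s acc v = acc := by
  rcases acc with ⟨bp, d⟩
  simp only [ssStep]
  split_ifs with hc
  · exact absurd hc.1 (by omega)
  · rfl

lemma foldl_step_noop (target s : Int) (l : List Int) (acc : List Int × Option Int)
    (h : ∀ v ∈ l, ssStep target s acc v = acc) :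
    l.foldl (ssStep target s) acc = acc := by
  induction l with
  | nil => rfl
  | cons v l ih =>
    rw [List.foldl_cons, h v List.mem_cons_self]
    exact ih (fun v' hv' => h v' (List.mem_cons_of_mem _ hv'))

lemma foldl_outer_noop (target : Int) (ss dropped : List Int) (acc : List Int × Option Int)
    (h : ∀ s ∈ ss, ∀ v ∈ dropped, noopC target acc.2 s v) :
    ss.foldl (fun acc s => dropped.foldl (ssStep target s) acc) acc = acc := by
  induction ss with
  | nil => rfl
  | cons s ss ih =>
    rw [List.foldl_cons,
      foldl_step_noop target s dropped acc
        (fun v hv => step_noop_of_noopC target s v acc (h s List.mem_cons_self v hv))]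
    exact ih (fun s' hs' => h s' (List.mem_cons_of_mem _ hs'))

-- the difference recorded by a fired-or-dominated step: it is at most target - (s + v)
-- and at most any previously recorded difference.
lemma ssStep_snd_of_le (target s v : Int) (bp : List Int) (d : Option Int)
    (hsum : s + v ≤ target) :
    ∃ dd', (ssStep target s (bp, d) v).2 = some dd' ∧ dd' ≤ target - (s + v) ∧
      (∀ dd, d = some dd → dd' ≤ dd) := by
  cases d with
  | none =>
    refine ⟨target - (s + v), ?_, le_refl _, fun dd hdd => by cases hdd⟩
    simp [ssStep, hsum]
  | some dd =>
    by_cases hlt : target - (s + v) < dd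
    · exact ⟨target - (s + v), by simp [ssStep, hsum, hlt], le_refl _,
        fun dd0 hdd0 => by cases hdd0; omega⟩
    · exact ⟨dd, by simp [ssStep, hsum, hlt], by omega,
        fun dd0 hdd0 => by cases hdd0; omega⟩

-- one iteration of the two-pointer loop on a valid pair is exactly one ssStep
lemma ssLoop_cons_of_le (target s v : Int) (ss' vs' bp : List Int) (d : Option Int)
    (hsum : s + v ≤ target) :
    ssLoop target (s :: ss') (v :: vs') bp d =
      ssLoop target (s :: ss') vs' (ssStep target s (bp, d) v).1 (ssStep target s (bp, d) v).2 := by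
  rw [ssLoop]
  cases d with
  | none => simp [ssStep, hsum]
  | some dd =>
    by_cases hlt : target - (s + v) < dd
    · simp [ssStep, hsum, hlt]
    · simp [ssStep, hsum, hlt]

lemma ssLoop_cons_of_gt (target s v : Int) (ss' vs' bp : List Int) (d : Option Int)
    (hsum : target < s + v) :
    ssLoop target (s :: ss') (v :: vs') bp d = ssLoop target ss' (v :: vs') bp d := by
  rw [ssLoop]
  have : ¬ (s + v ≤ target) := by omega
  simp [this]

-- Invariant of the two-pointer sweep: with the savory prefix `dropped` already consumed
-- and every pair of (remaining sweets) x dropped a no-op for the current accumulator,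
-- the sweep computes exactly the brute-force double fold over the FULL savory list.
lemma ssLoop_eq (target : Int) (n : Nat) :
    ∀ (ss vs dropped bp : List Int) (d : Option Int),
      ss.length + vs.length ≤ n →
      ss.Pairwise (fun a b => b ≤ a) →
      vs.Pairwise (fun a b => a ≤ b) →
      (∀ s ∈ ss, ∀ v ∈ dropped, noopC target d s v) →
      ssLoop target ss vs bp d =
        (ss.foldl (fun acc s => (dropped ++ vs).foldl (ssStep target s) acc) (bp, d)).1 := by
  induction n with
  | zero =>
    intro ss vs dropped bp d hlen _ _ _
    have hss : ss = [] := by cases ss <;> simp_all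
    subst hss
    simp [ssLoop]
  | succ n ih =>
    intro ss vs dropped bp d hlen hss hvs hnoop
    match ss, vs with
    | [], vs => simp [ssLoop]
    | s :: ss', [] =>
      have h := foldl_outer_noop target (s :: ss') dropped (bp, d) hnoop
      simp only [List.append_nil]
      rw [h]
      simp [ssLoop]
    | s :: ss', v :: vs' =>
      have hs_le : ∀ x ∈ ss', x ≤ s := (List.pairwise_cons.1 hss).1
      have hss' : ss'.Pairwise (fun a b => b ≤ a) := (List.pairwise_cons.1 hss).2
      have hv_le : ∀ x ∈ vs', v ≤ x := (List.pairwise_cons.1 hvs).1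
      have hvs' : vs'.Pairwise (fun a b => a ≤ b) := (List.pairwise_cons.1 hvs).2
      have hlen' : (s :: ss').length + vs'.length ≤ n := by
        simp only [List.length_cons] at hlen ⊢; omega
      have hlen'' : ss'.length + (v :: vs').length ≤ n := by
        simp only [List.length_cons] at hlen ⊢; omega
      have hdropped : ∀ s'' ∈ s :: ss', dropped.foldl (ssStep target s'') (bp, d) = (bp, d) :=
        fun s'' hs'' => foldl_step_noop target s'' dropped (bp, d)
          (fun v'' hv'' => step_noop_of_noopC target s'' v'' (bp, d) (hnoop s'' hs'' v'' hv''))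
      by_cases hsum : s + v ≤ target
      · -- valid pair: A consumes v (possibly updating); B's ssStep at (s, v) does the same,
        -- and afterwards every pair of (s :: ss') x (dropped ++ [v]) is a no-op
        have hnoop' : ∀ s'' ∈ s :: ss', ∀ v'' ∈ dropped ++ [v],
            noopC target (ssStep target s (bp, d) v).2 s'' v'' := by
          obtain ⟨dd', hdd', hle1, hle2⟩ := ssStep_snd_of_le target s v bp d hsum
          intro s'' hs'' v'' hv'' hleP
          have hs''le : s'' ≤ s := by
            rcases List.mem_cons.1 hs'' with h | h
            · omega
            · exact hs_le s'' h
          rw [hdd']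
          refine ⟨dd', rfl, ?_⟩
          rcases List.mem_append.1 hv'' with hvd | hvv
          · obtain ⟨dd, hdd, hddle⟩ := hnoop s'' hs'' v'' hvd hleP
            have := hle2 dd hdd
            omega
          · have hv''v : v'' = v := by simpa using hvv
            omega
        have hstep2 : ssStep target s (ssStep target s (bp, d) v) v = ssStep target s (bp, d) v :=
          step_noop_of_noopC target s v _
            (hnoop' s List.mem_cons_self v (List.mem_append_right _ List.mem_cons_self))
        have hdrop' : dropped.foldl (ssStep target s) (ssStep target s (bp, d) v) =
            ssStep target s (bp, d) v :=
          foldl_step_noop target s dropped _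
            (fun v'' hv'' => step_noop_of_noopC target s v'' _
              (hnoop' s List.mem_cons_self v'' (List.mem_append_left _ hv'')))
        have hIH := ih (s :: ss') vs' (dropped ++ [v]) (ssStep target s (bp, d) v).1
          (ssStep target s (bp, d) v).2 hlen' hss hvs' hnoop'
        rw [ssLoop_cons_of_le target s v ss' vs' bp d hsum, hIH, Prod.mk.eta]
        simp only [List.append_assoc, List.singleton_append, List.foldl_cons]
        have hinner : (dropped ++ v :: vs').foldl (ssStep target s) (ssStep target s (bp, d) v)
            = (dropped ++ v :: vs').foldl (ssStep target s) (bp, d) := by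
          rw [List.foldl_append, List.foldl_append, hdropped s List.mem_cons_self, hdrop',
            List.foldl_cons, List.foldl_cons, hstep2]
        rw [hinner]
      · -- invalid pair: A drops s; B's whole inner pass for s is a no-op
        have hIH := ih ss' (v :: vs') dropped bp d hlen'' hss' hvs
          (fun s'' hs'' => hnoop s'' (List.mem_cons_of_mem _ hs''))
        rw [ssLoop_cons_of_gt target s v ss' vs' bp d (by omega), hIH]
        simp only [List.foldl_cons]
        have hfirst : (dropped ++ v :: vs').foldl (ssStep target s) (bp, d) = (bp, d) := by
          rw [List.foldl_append, hdropped s List.mem_cons_self]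
          exact foldl_step_noop target s (v :: vs') (bp, d)
            (fun v'' hv'' => step_noop_of_gt target s v'' (bp, d)
              (by rcases List.mem_cons.1 hv'' with h | h
                  · omega
                  · have := hv_le v'' h; omega))
        rw [hfirst]

-- sorted(negatives, key=abs) is value-descending
lemma sweet_sorted_desc (dishes : List Int) :
    (PySem.List.sorted (dishes.filter (fun dish => decide (dish < 0))) (fun dish => |dish|)).Pairwise
      (fun a b => b ≤ a) := by
  have hp := PySem.List.sorted_pairwise (xs := dishes.filter (fun dish => decide (dish < 0)))
    (key := fun dish => |dish|)
  refine List.Pairwise.imp_of_mem ?_ hp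
  intro a b ha hb hab
  have ha' : a < 0 := by
    have h1 := (PySem.List.mem_sorted _ _ _ _).1 ha
    have := (List.mem_filter.1 h1).2
    simpa using this
  have hb' : b < 0 := by
    have h1 := (PySem.List.mem_sorted _ _ _ _).1 hb
    have := (List.mem_filter.1 h1).2
    simpa using this
  rw [abs_of_neg ha', abs_of_neg hb'] at hab
  omega

lemma savory_sorted_asc (dishes : List Int) :
    (PySem.List.sorted (dishes.filter (fun dish => decide (dish > 0))) (fun dish => dish)).Pairwise
      (fun a b => a ≤ b) := by
  simpa using PySem.List.sorted_pairwise (xs := dishes.filter (fun dish => decide (dish > 0)))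
    (key := fun dish => dish)

-- ===== VERDICT (by name: the statement is the Claim_ definition above) =====
theorem sweetAndSavory_spec : Claim_equal_sweetAndSavory := by
  intro dishes target _
  simp only [Spec_sweetAndSavory, sweetAndSavory, sweetAndSavory_alt]
  rw [ssLoop_eq target
    ((PySem.List.sorted (dishes.filter (fun dish => decide (dish < 0))) (fun dish => |dish|)).length +
     (PySem.List.sorted (dishes.filter (fun dish => decide (dish > 0))) (fun dish => dish)).length)
    _ _ [] [0, 0] none le_rfl (sweet_sorted_desc dishes) (savory_sorted_asc dishes)
    (fun s _ v hv => absurd hv (List.not_mem_nil))]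
  simp only [List.nil_append]
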